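-- pv_equiv track=rewrite | github.com/Utkarsh2802/gspyproj | codechef/foobar/foobarlvq1.py | solution
-- ===== SOURCE A (Python) =====
-- from itertools import combinations
-- from itertools import combinations
--
-- def solution(num_buns, num_required):
--     #For all combintions of size num_required-1 from num_buns there should be atleast one unique key missing
--     #Each key should be repeated exactly (num_buns-num_required)+1
--     #Ex: suppose 10 bunnies are required to open the cell and there are 100 bunnies if key 'x' is repeated less than 90 times then we can choose 10 bunnies such that key 'x' is not among
--     #thus we need each key to be repeated 91 times in the abpve example
--     answer=[[] for i in range(num_buns)]
--     initial_key = 0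
--     for i in combinations(answer,num_buns-num_required+1):
--         for j in i:
--             j.append(initial_key)
--         initial_key+=1
--     return answer
-- ===== SOURCE B (Python) =====
-- from itertools import combinations
--
-- def solution(num_buns, num_required):
--     # Dual view: key `key` is missing from exactly one "holdout" group of
--     # num_required-1 bunnies; enumerate those small groups (in reverse-lex
--     # order, which matches the lex order of their complements) and hand the
--     # key to every bunny outside the group.
--     answer = [[] for _ in range(num_buns)]
--     holdout_size = num_required - 1
--     if holdout_size < 0:
--         # num_required <= 0: no key may ever be required, so nobody gets keys
--         return answer
--     for key, holdout in enumerate(reversed(list(combinations(range(num_buns), holdout_size)))):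
--         for i in range(num_buns):
--             if i not in holdout:
--                 answer[i].append(key)
--     return answer
-- ===== Notes on version B (the rewrite author's own statement) =====
-- stated objective: alternative
-- what changed: Instead of enumerating the size-(num_buns-num_required+1) key-holding groups and appending the key to each member, B enumerates the size-(num_required-1) holdout groups in reverse-lex order (the complements of A's lex-ordered groups) and gives each key to every bunny outside its holdout; the trivial num_required<=0 case returns empty key lists directly.
import Mathlib
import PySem

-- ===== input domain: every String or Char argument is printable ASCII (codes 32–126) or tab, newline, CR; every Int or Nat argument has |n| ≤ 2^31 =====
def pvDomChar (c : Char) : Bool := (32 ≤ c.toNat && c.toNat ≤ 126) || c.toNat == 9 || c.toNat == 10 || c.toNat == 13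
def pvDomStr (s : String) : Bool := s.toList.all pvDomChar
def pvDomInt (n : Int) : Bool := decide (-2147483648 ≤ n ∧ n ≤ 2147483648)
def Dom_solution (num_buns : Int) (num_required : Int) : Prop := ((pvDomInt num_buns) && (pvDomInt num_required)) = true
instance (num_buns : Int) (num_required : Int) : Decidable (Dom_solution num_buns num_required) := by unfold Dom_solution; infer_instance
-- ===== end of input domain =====

-- B enumerates the size-(num_required-1) holdout groups (reversed) instead of the
-- size-(num_buns-num_required+1) holding groups; same return value, objective: alternative.

-- itertools.combinations(xs, k) in lexicographic order (shared primitive of both ports)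
def combos : List Nat → Nat → List (List Nat)
  | _, 0 => [[]]
  | [], _ + 1 => []
  | x :: xs, k + 1 =>
    if xs.length + 1 < k + 1 then []  -- itertools: no tuples at all when r exceeds len
    else ((combos xs k).map (fun c => x :: c)) ++ combos xs (k + 1)

-- ===== PORT A =====
def solution (num_buns : Int) (num_required : Int) : List (List Int) :=
  let answer : List (List Int) := List.replicate num_buns.toNat []
  ((combos (List.range num_buns.toNat) (num_buns - num_required + 1).toNat).foldl
    (fun (st : List (List Int) × Int) i =>
      (i.foldl (fun ans j => ans.modify j (fun l => l ++ [st.2])) st.1, st.2 + 1))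
    (answer, 0)).1

-- ===== PORT B =====
def solution_alt (num_buns : Int) (num_required : Int) : List (List Int) :=
  let answer : List (List Int) := List.replicate num_buns.toNat []
  let holdoutSize := num_required - 1
  if holdoutSize < 0 then answer
  else
    (PySem.List.enumerate (combos (List.range num_buns.toNat) holdoutSize.toNat).reverse).foldl
      (fun ans kh =>
        (List.range num_buns.toNat).foldl
          (fun a i => if i ∈ kh.2 then a else a.modify i (fun l => l ++ [kh.1])) ans)
      answer

-- ===== PRECONDITION & SPEC =====
-- Pre_ excludes exactly the inputs where A raises ValueError
-- (combinations with negative size num_buns - num_required + 1 < 0).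
def Pre_solution (num_buns : Int) (num_required : Int) : Prop :=
  num_required ≤ num_buns + 1
instance (num_buns : Int) (num_required : Int) : Decidable (Pre_solution num_buns num_required) := by
  unfold Pre_solution; infer_instance

def pvWitness_solution : Int × Int := (4, 3)

def Spec_solution (num_buns : Int) (num_required : Int) (out : List (List Int)) : Prop := out = solution_alt num_buns num_required
instance (num_buns : Int) (num_required : Int) (out : List (List Int)) : Decidable (Spec_solution num_buns num_required out) := by unfold Spec_solution; infer_instance

-- ===== CLAIM (what is proved, stated in full; the proofs are below) =====
def Claim_equal_solution : Prop := ∀ (num_buns : Int) (num_required : Int), Dom_solution num_buns num_required → Pre_solution num_buns num_required → Spec_solution num_buns num_required (solution num_buns num_required)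

-- ===== LEMMAS AND PROOFS =====

lemma combos_nil_of_lt : ∀ (xs : List Nat) (k : Nat), xs.length < k → combos xs k = [] := by
  intro xs k hk
  cases xs with
  | nil => cases k with
    | zero => omega
    | succ k' => simp [combos]
  | cons x xs => cases k with
    | zero => simp at hk
    | succ k' =>
      simp only [List.length_cons] at hk
      rw [combos, if_pos (by omega)]

lemma combos_cons_of_le (x : Nat) (xs : List Nat) (k : Nat) (hk : k + 1 ≤ xs.length + 1) :
    combos (x :: xs) (k + 1) = ((combos xs k).map (fun c => x :: c)) ++ combos xs (k + 1) := by
  rw [combos, if_neg (by omega)]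

lemma combos_self : ∀ (xs : List Nat), combos xs xs.length = [xs] := by
  intro xs
  induction xs with
  | nil => simp [combos]
  | cons x xs ih =>
    rw [show (x :: xs).length = xs.length + 1 from rfl,
      combos_cons_of_le x xs xs.length (by omega), ih,
      combos_nil_of_lt xs (xs.length + 1) (by omega)]
    simp

lemma mem_of_mem_combos : ∀ (xs : List Nat) (k : Nat) (c : List Nat),
    c ∈ combos xs k → ∀ y ∈ c, y ∈ xs := by
  intro xs
  induction xs with
  | nil =>
    intro k c hc y hy
    cases k with
    | zero => simp [combos] at hc; subst hc; simp at hy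
    | succ k' => simp [combos] at hc
  | cons x xs ih =>
    intro k c hc y hy
    cases k with
    | zero => simp [combos] at hc; subst hc; simp at hy
    | succ k' =>
      by_cases hg : xs.length + 1 < k' + 1
      · rw [combos, if_pos hg] at hc; simp at hc
      rw [combos, if_neg hg] at hc
      simp only [List.mem_append, List.mem_map] at hc
      rcases hc with ⟨c', hc', rfl⟩ | hc
      · rcases List.mem_cons.mp hy with rfl | hy'
        · exact List.mem_cons_self
        · exact List.mem_cons_of_mem _ (ih k' c' hc' y hy')
      · exact List.mem_cons_of_mem _ (ih (k' + 1) c hc y hy)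

-- complements of the lex-ordered size-k combinations are the reverse-lex size-h combinations
lemma compl_combos : ∀ (xs : List Nat), xs.Nodup → ∀ (k h : Nat), k + h = xs.length →
    (combos xs k).map (fun c => xs.filter (fun y => y ∉ c)) = (combos xs h).reverse := by
  intro xs
  induction xs with
  | nil =>
    intro _ k h hk
    have hk0 : k = 0 := by simp at hk; omega
    have hh0 : h = 0 := by simp at hk; omega
    subst hk0; subst hh0
    simp [combos]
  | cons x xs ih =>
    intro hnd k h hk
    have hx : x ∉ xs := (List.nodup_cons.mp hnd).1
    have hnd' : xs.Nodup := (List.nodup_cons.mp hnd).2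
    simp only [List.length_cons] at hk
    cases k with
    | zero =>
      have hh : h = xs.length + 1 := by omega
      subst hh
      have : combos (x :: xs) (xs.length + 1) = combos (x :: xs) (x :: xs).length := by simp
      rw [this, combos_self]
      simp [combos]
    | succ k' =>
      -- head-filter simplification, uniform in c
      have hfilt1 : ∀ c : List Nat,
          (x :: xs).filter (fun y => decide (y ∉ x :: c)) = xs.filter (fun y => decide (y ∉ c)) := by
        intro c
        simp only [List.filter_cons]
        have : (decide (x ∉ x :: c)) = false := by simp
        rw [this]
        apply List.filter_congr
        intro y hy
        have : y ≠ x := fun h => hx (h ▸ hy)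
        simp [this]
      have hfilt2 : ∀ c ∈ combos xs (k' + 1),
          (x :: xs).filter (fun y => decide (y ∉ c)) = x :: xs.filter (fun y => decide (y ∉ c)) := by
        intro c hc
        have hxc : x ∉ c := fun h => hx (mem_of_mem_combos xs (k' + 1) c hc x h)
        simp only [List.filter_cons]
        simp [hxc]
      cases h with
      | zero =>
        have hk' : k' = xs.length := by omega
        subst hk'
        rw [show combos (x :: xs) (xs.length + 1) = combos (x :: xs) (x :: xs).length by simp,
          combos_self]
        simp only [combos, List.map_cons, List.map_nil, List.reverse_cons, List.reverse_nil]
        have h1 : (x :: xs).filter (fun y => decide (y ∉ x :: xs)) = [] := by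
          simp [List.filter_eq_nil_iff]
          exact fun a ha _ => ha
        simp only [h1]
        simp
      | succ h'' =>
        by_cases hg : xs.length + 1 < k' + 1
        · rw [combos_nil_of_lt (x :: xs) (k' + 1) (by simp; omega),
            combos_nil_of_lt (x :: xs) (h'' + 1) (by simp; omega)]
          simp
        rw [combos_cons_of_le x xs k' (by omega),
          combos_cons_of_le x xs h'' (by omega)]
        simp only [List.map_append, List.map_map, List.reverse_append]
        have e1 : (combos xs k').map ((fun c => (x :: xs).filter (fun y => decide (y ∉ c))) ∘ (fun c => x :: c))
            = (combos xs k').map (fun c => xs.filter (fun y => decide (y ∉ c))) := by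
          apply List.map_congr_left; intro c _; exact hfilt1 c
        have e2 : (combos xs (k' + 1)).map (fun c => (x :: xs).filter (fun y => decide (y ∉ c)))
            = (combos xs (k' + 1)).map (fun c => x :: xs.filter (fun y => decide (y ∉ c))) := by
          apply List.map_congr_left; intro c hc; exact hfilt2 c hc
        rw [e1, e2]
        have ih1 : (combos xs k').map (fun c => xs.filter (fun y => decide (y ∉ c)))
            = (combos xs (h'' + 1)).reverse := ih hnd' k' (h'' + 1) (by omega)
        have ih2 : (combos xs (k' + 1)).map (fun c => xs.filter (fun y => decide (y ∉ c)))
            = (combos xs h'').reverse := ih hnd' (k' + 1) h'' (by omega)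
        rw [ih1]
        have : (combos xs (k' + 1)).map (fun c => x :: xs.filter (fun y => decide (y ∉ c)))
            = ((combos xs (k' + 1)).map (fun c => xs.filter (fun y => decide (y ∉ c)))).map (fun c => x :: c) := by
          simp [List.map_map]
        rw [this, ih2]
        simp [List.map_reverse]

-- one key round: fold of modify over the complement list = guarded fold over range
lemma step_eq (n : Nat) (hold : List Nat) (key : Int) (ans : List (List Int)) :
    ((List.range n).filter (fun y => decide (y ∉ hold))).foldl
      (fun a j => a.modify j (fun l => l ++ [key])) ans
    = (List.range n).foldl
      (fun a i => if i ∈ hold then a else a.modify i (fun l => l ++ [key])) ans := by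
  rw [List.foldl_filter]
  congr 1
  funext a i
  by_cases hi : i ∈ hold <;> simp [hi]

-- A's counter fold over the complement lists = B's fold over the enumerated holdouts
lemma fold_enum (n : Nat) : ∀ (L : List (List Nat)) (ans : List (List Int)) (k0 : Int),
    ((L.map (fun c => (List.range n).filter (fun y => decide (y ∉ c)))).foldl
      (fun (st : List (List Int) × Int) i =>
        (i.foldl (fun a j => a.modify j (fun l => l ++ [st.2])) st.1, st.2 + 1))
      (ans, k0)).1
    = (PySem.List.enumerate L k0).foldl
      (fun a kh =>
        (List.range n).foldl
          (fun b i => if i ∈ kh.2 then b else b.modify i (fun l => l ++ [kh.1])) a)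
      ans := by
  intro L
  induction L with
  | nil => intro ans k0; simp [PySem.List.enumerate_nil]
  | cons c L ih =>
    intro ans k0
    rw [PySem.List.enumerate_cons]
    simp only [List.map_cons, List.foldl_cons]
    rw [ih]
    congr 1
    exact step_eq n c k0 ans

-- ===== VERDICT (by name: the statement is the Claim_ definition above) =====
theorem solution_spec : Claim_equal_solution := by
  intro num_buns num_required _ hpre
  unfold Spec_solution solution solution_alt
  simp only []
  by_cases hneg : num_required - 1 < 0
  · -- B takes the trivial branch; A's combination list is empty (or one empty tuple)
    rw [if_pos hneg]
    by_cases hb : num_buns < 0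
    · have hn0 : num_buns.toNat = 0 := by omega
      rw [hn0]
      cases hkt : (num_buns - num_required + 1).toNat with
      | zero => simp [combos]
      | succ m => simp [combos]
    · have hk : (num_buns.toNat : Int) < num_buns - num_required + 1 := by omega
      have : (List.range num_buns.toNat).length < (num_buns - num_required + 1).toNat := by
        simp; omega
      rw [combos_nil_of_lt _ _ this]
      simp
  · rw [if_neg hneg]
    have hb0 : 0 ≤ num_buns := by unfold Pre_solution at hpre; omega
    have hsum : (num_buns - num_required + 1).toNat + (num_required - 1).toNat
        = (List.range num_buns.toNat).length := by
      simp; unfold Pre_solution at hpre; omega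
    have hcompl := compl_combos (List.range num_buns.toNat) (List.nodup_range)
      (num_buns - num_required + 1).toNat (num_required - 1).toNat hsum
    -- the other direction of the bijection:
    have hcompl2 := compl_combos (List.range num_buns.toNat) (List.nodup_range)
      (num_required - 1).toNat (num_buns - num_required + 1).toNat (by omega)
    have hmain : combos (List.range num_buns.toNat) (num_buns - num_required + 1).toNat
        = ((combos (List.range num_buns.toNat) (num_required - 1).toNat).reverse).map
            (fun c => (List.range num_buns.toNat).filter (fun y => decide (y ∉ c))) := by
      rw [List.map_reverse, hcompl2, List.reverse_reverse]
    rw [hmain, fold_enum]
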